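-- pv_equiv track=rewrite | github.com/mmjaffry/ansaralhujjah | build_notes.py | extract_overview_session_index_html
-- ===== SOURCE A (Python) =====
-- def extract_overview_session_index_html(content_html):
--     """
--     Extract the overview block from H1 through Session Index tables.
--     Stops before "Core Framework" section when present.
--     """
--     start = content_html.find('<h1')
--     if start == -1:
--         start = 0
--
--     end_candidates = []
--     for marker in (
--         '<h2 id="core-framework"',
--         '<h2 id="surahs-covered"',
--         '<h2 id="central-themes"',
--         '<h2 id="key-verses"',
--     ):
--         pos = content_html.find(marker, start)
--         if pos != -1:
--             end_candidates.append(pos)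
--
--     end = min(end_candidates) if end_candidates else len(content_html)
--     return content_html[start:end].strip()
-- ===== SOURCE B (Python) =====
-- _MARKERS = (
--     '<h2 id="core-framework"',
--     '<h2 id="surahs-covered"',
--     '<h2 id="central-themes"',
--     '<h2 id="key-verses"',
-- )
--
--
-- def extract_overview_session_index_html(content_html):
--     """Single left-to-right scan: walk forward from the H1 start and stop at
--     the first position where any section marker begins, instead of running
--     four separate find() passes and taking the min."""
--     start = content_html.find('<h1')
--     if start == -1:
--         start = 0
--     end = len(content_html)
--     for i in range(start, len(content_html)):
--         if any(content_html.startswith(m, i) for m in _MARKERS):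
--             end = i
--             break
--     return content_html[start:end].strip()
-- ===== Notes on version B (the rewrite author's own statement) =====
-- stated objective: alternative
-- what changed: Replaces A's four independent full-string find() passes plus a min() reduction with a single left-to-right scan from the H1 start that stops at the first position where any of the four section markers begins.
import Mathlib
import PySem

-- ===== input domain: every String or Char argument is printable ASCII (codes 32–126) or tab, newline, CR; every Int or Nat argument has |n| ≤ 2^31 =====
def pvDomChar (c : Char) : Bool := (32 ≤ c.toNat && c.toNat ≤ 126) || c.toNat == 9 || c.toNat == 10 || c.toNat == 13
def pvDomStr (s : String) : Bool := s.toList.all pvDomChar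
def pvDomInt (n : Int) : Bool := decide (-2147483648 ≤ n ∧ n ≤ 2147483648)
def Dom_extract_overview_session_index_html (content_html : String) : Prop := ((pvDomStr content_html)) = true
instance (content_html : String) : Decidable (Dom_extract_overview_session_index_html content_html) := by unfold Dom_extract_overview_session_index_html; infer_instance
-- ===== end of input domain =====

-- B replaces A's four full find() passes plus min with one left-to-right scan that stops at the
-- first position where any marker begins (objective: alternative single-pass algorithm).

-- ===== PORT A =====
def pvMarkersA : List String :=
  ["<h2 id=\"core-framework\"", "<h2 id=\"surahs-covered\"",
   "<h2 id=\"central-themes\"", "<h2 id=\"key-verses\""]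

def extract_overview_session_index_html (content_html : String) : String :=
  let start0 : Int := PySem.Str.find content_html "<h1"
  let start : Int := if start0 = -1 then 0 else start0
  let end_candidates : List Int :=
    pvMarkersA.foldl (fun acc marker =>
      let pos := PySem.Str.findFrom content_html marker start
      if pos ≠ -1 then acc ++ [pos] else acc) []
  let e : Int :=
    match PySem.List.min? end_candidates (fun x => x) with
    | some v => v
    | none => PySem.Str.len content_html
  PySem.Str.strip (PySem.Str.slice content_html (some start) (some e))

-- ===== PORT B =====
def pvMarkersB : List (List Char) :=
  ["<h2 id=\"core-framework\"".toList, "<h2 id=\"surahs-covered\"".toList,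
   "<h2 id=\"central-themes\"".toList, "<h2 id=\"key-verses\"".toList]

-- Source B's `for i in range(start, len): if any(startswith(m, i)): end = i; break`,
-- as the structural recursion over the suffix with the absolute index carried along
def pvScanB : List Char → Nat → Option Nat
  | [], _ => none
  | c :: rest, i =>
    if pvMarkersB.any (fun m => PySem.Chars.startswith (c :: rest) m) then some i
    else pvScanB rest (i + 1)

def extract_overview_session_index_html_alt (content_html : String) : String :=
  let start0 : Int := PySem.Str.find content_html "<h1"
  let start : Int := if start0 = -1 then 0 else start0
  -- start ≥ 0 by construction, so .toNat is exact
  let e : Int :=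
    match pvScanB (content_html.toList.drop start.toNat) start.toNat with
    | some j => (j : Int)
    | none => PySem.Str.len content_html
  PySem.Str.strip (PySem.Str.slice content_html (some start) (some e))

-- ===== PRECONDITION & SPEC =====
def Spec_extract_overview_session_index_html (content_html : String) (out : String) : Prop := out = extract_overview_session_index_html_alt content_html
instance (content_html : String) (out : String) : Decidable (Spec_extract_overview_session_index_html content_html out) := by unfold Spec_extract_overview_session_index_html; infer_instance

-- ===== CLAIM (what is proved, stated in full; the proofs are below) =====
def Claim_equal_extract_overview_session_index_html : Prop := ∀ (content_html : String), Dom_extract_overview_session_index_html content_html → Spec_extract_overview_session_index_html content_html (extract_overview_session_index_html content_html)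

-- ===== LEMMAS AND PROOFS =====

-- "some marker starts at the head of t"
def pvHit (t : List Char) : Prop := ∃ m ∈ pvMarkersB, m <+: t

lemma pvHit_iff_any (t : List Char) :
    pvHit t ↔ pvMarkersB.any (fun m => PySem.Chars.startswith t m) = true := by
  simp [pvHit, List.any_eq_true, PySem.Chars.startswith_iff]

lemma pvHit_nil_false : ¬ pvHit [] := by
  rw [pvHit_iff_any]; decide

-- proof-side relative form of the scan
def pvFirstHit : List Char → Option Nat
  | [] => none
  | c :: rest =>
    if pvMarkersB.any (fun m => PySem.Chars.startswith (c :: rest) m) then some 0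
    else (pvFirstHit rest).map (· + 1)

lemma pvScanB_eq_firstHit (t : List Char) : ∀ k, pvScanB t k = (pvFirstHit t).map (k + ·) := by
  induction t with
  | nil => intro k; rfl
  | cons c rest ih =>
    intro k
    by_cases h : pvMarkersB.any (fun m => PySem.Chars.startswith (c :: rest) m) = true
    · simp [pvScanB, pvFirstHit, h]
    · simp only [pvScanB, pvFirstHit, h, if_false, Bool.false_eq_true, ih (k + 1), Option.map_map]
      cases pvFirstHit rest <;> simp
      omega

lemma pvFirstHit_some {t : List Char} {j : Nat} (h : pvFirstHit t = some j) :
    pvHit (t.drop j) ∧ ∀ i < j, ¬ pvHit (t.drop i) := by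
  induction t generalizing j with
  | nil => simp [pvFirstHit] at h
  | cons c rest ih =>
    by_cases hc : pvMarkersB.any (fun m => PySem.Chars.startswith (c :: rest) m) = true
    · simp [pvFirstHit, hc] at h
      subst h
      exact ⟨(pvHit_iff_any _).2 hc, by omega⟩
    · simp [pvFirstHit, hc] at h
      obtain ⟨j', hj', rfl⟩ := h
      obtain ⟨h1, h2⟩ := ih hj'
      refine ⟨h1, ?_⟩
      intro i hi
      match i with
      | 0 => simpa [pvHit_iff_any] using hc
      | i + 1 => exact h2 i (by omega)

lemma pvFirstHit_none {t : List Char} (h : pvFirstHit t = none) :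
    ∀ j, ¬ pvHit (t.drop j) := by
  induction t with
  | nil => intro j; simpa using pvHit_nil_false
  | cons c rest ih =>
    by_cases hc : pvMarkersB.any (fun m => PySem.Chars.startswith (c :: rest) m) = true
    · simp [pvFirstHit, hc] at h
    · simp [pvFirstHit, hc] at h
      intro j
      match j with
      | 0 => simpa [pvHit_iff_any] using hc
      | j + 1 => exact ih h j

lemma pvMarkersB_eq : pvMarkersB = pvMarkersA.map String.toList := by rfl

-- the heart: A's min-of-finds end equals B's scan end (relative to the common suffix)
lemma pvEnd_eq (cs : List Char) (k : Nat) (hk : k ≤ cs.length) :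
    (match PySem.List.min?
        ((pvMarkersA.filter (fun m => decide (PySem.Chars.findFrom cs m.toList (k : Int) ≠ -1))).map
          (fun m => PySem.Chars.findFrom cs m.toList (k : Int))) (fun x => x) with
      | some v => v
      | none => (cs.length : Int))
    = (match pvScanB (cs.drop k) k with
      | some j => (j : Int)
      | none => (cs.length : Int)) := by
  rw [pvScanB_eq_firstHit]
  have hmemB : ∀ m ∈ pvMarkersA, m.toList ∈ pvMarkersB := by
    intro m hm; rw [pvMarkersB_eq]; exact List.mem_map_of_mem hm
  cases hF : pvFirstHit (cs.drop k) with
  | none =>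
    have hfilter : pvMarkersA.filter
        (fun m => decide (PySem.Chars.findFrom cs m.toList (k : Int) ≠ -1)) = [] := by
      rw [List.filter_eq_nil_iff]
      intro m hm
      simp only [decide_eq_true_eq, not_not]
      rw [PySem.Chars.findFrom_natCast_eq_neg_one_iff cs m.toList k hk]
      intro hinf
      obtain ⟨j, hpre⟩ := (PySem.Chars.exists_prefix_drop_iff_isIn m.toList (cs.drop k)).2
        ((PySem.Chars.isIn_iff_infix m.toList (cs.drop k)).2 hinf)
      exact pvFirstHit_none hF j ⟨m.toList, hmemB m hm, hpre⟩
    rw [hfilter]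
    simp [(PySem.List.min?_eq_none_iff ([] : List Int) (fun x => x)).2 rfl]
  | some j =>
    obtain ⟨hhit, hmin⟩ := pvFirstHit_some hF
    obtain ⟨m, hmB, hpre⟩ := hhit
    obtain ⟨mS, hmS, rfl⟩ := by rw [pvMarkersB_eq] at hmB; exact List.mem_map.1 hmB
    -- find of the witness marker in the suffix is exactly j
    have hfind : ∀ m' : List Char, m' ∈ pvMarkersB → m' <+: (cs.drop k).drop j →
        PySem.Chars.find (cs.drop k) m' = (j : Int) := by
      intro m' hm' hp
      have hinf : m' <:+: cs.drop k := by
        rw [← PySem.Chars.isIn_iff_infix, ← PySem.Chars.exists_prefix_drop_iff_isIn]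
        exact ⟨j, hp⟩
      have hnn : 0 ≤ PySem.Chars.find (cs.drop k) m' :=
        (PySem.Chars.find_nonneg_iff (cs.drop k) m').2 hinf
      obtain ⟨hp0, hlt⟩ := PySem.Chars.find_spec hnn
      have h1 : ¬ j < (PySem.Chars.find (cs.drop k) m').toNat := fun hc => hlt j hc hp
      have h2 : ¬ (PySem.Chars.find (cs.drop k) m').toNat < j := fun hc =>
        hmin _ hc ⟨m', hm', hp0⟩
      omega
    -- value of findFrom for every kept marker is ≥ k + j, and the witness attains k + j
    have hcast : ∀ m' : String, PySem.Chars.findFrom cs m'.toList (k : Int) =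
        if PySem.Chars.find (cs.drop k) m'.toList = -1 then -1
        else (k : Int) + PySem.Chars.find (cs.drop k) m'.toList := fun m' =>
      PySem.Chars.findFrom_natCast cs m'.toList k hk
    have hwit : PySem.Chars.findFrom cs mS.toList (k : Int) = (k : Int) + (j : Int) := by
      rw [hcast mS, hfind mS.toList hmB hpre]
      have : (j : Int) ≠ -1 := by omega
      simp [this]
    have hmem : ((k : Int) + (j : Int)) ∈
        (pvMarkersA.filter (fun m => decide (PySem.Chars.findFrom cs m.toList (k : Int) ≠ -1))).map
          (fun m => PySem.Chars.findFrom cs m.toList (k : Int)) := by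
      refine List.mem_map.2 ⟨mS, List.mem_filter.2 ⟨hmS, ?_⟩, hwit⟩
      simp [hwit]; omega
    have hlb : ∀ v ∈ (pvMarkersA.filter
          (fun m => decide (PySem.Chars.findFrom cs m.toList (k : Int) ≠ -1))).map
          (fun m => PySem.Chars.findFrom cs m.toList (k : Int)),
        (k : Int) + (j : Int) ≤ v := by
      intro v hv
      obtain ⟨m', hm', rfl⟩ := List.mem_map.1 hv
      obtain ⟨hm'A, hne⟩ := List.mem_filter.1 hm'
      simp only [decide_eq_true_eq] at hne
      rw [hcast m'] at hne ⊢
      by_cases hfe : PySem.Chars.find (cs.drop k) m'.toList = -1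
      · simp [hfe] at hne
      · simp only [hfe, if_false]
        have hnn : 0 ≤ PySem.Chars.find (cs.drop k) m'.toList := by
          have := PySem.Chars.neg_one_le_find (cs.drop k) m'.toList; omega
        obtain ⟨hp0, _⟩ := PySem.Chars.find_spec hnn
        have : ¬ (PySem.Chars.find (cs.drop k) m'.toList).toNat < j := fun hc =>
          hmin _ hc ⟨m'.toList, hmemB m' hm'A, hp0⟩
        omega
    cases hm? : PySem.List.min?
        ((pvMarkersA.filter (fun m => decide (PySem.Chars.findFrom cs m.toList (k : Int) ≠ -1))).map
          (fun m => PySem.Chars.findFrom cs m.toList (k : Int))) (fun x => x) with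
    | none =>
      rw [PySem.List.min?_eq_none_iff] at hm?
      rw [hm?] at hmem
      simp at hmem
    | some v =>
      have h1 : (k : Int) + (j : Int) ≤ v := hlb v (PySem.List.min?_mem hm?)
      have h2 : v ≤ (k : Int) + (j : Int) := PySem.List.min?_isMin hm? _ hmem
      simp only [Option.map_some]
      push_cast
      exact le_antisymm h2 h1

-- A's candidate-collecting foldl, in filter/map form
lemma pvFold_eq (g : String → Int) (acc : List Int) :
    pvMarkersA.foldl (fun acc marker =>
      let pos := g marker
      if pos ≠ -1 then acc ++ [pos] else acc) acc
    = acc ++ (pvMarkersA.filter (fun m => decide (g m ≠ -1))).map g := by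
  have h := PySem.List.foldl_append_if (fun m => decide (g m ≠ -1)) g pvMarkersA acc
  simpa using h

lemma pv_main (s : String) :
    extract_overview_session_index_html s = extract_overview_session_index_html_alt s := by
  unfold extract_overview_session_index_html extract_overview_session_index_html_alt
  simp only [PySem.Str.findFrom_eq, PySem.Str.find_eq, PySem.Str.len_eq]
  set start : Int := if PySem.Chars.find s.toList "<h1".toList = -1 then 0
    else PySem.Chars.find s.toList "<h1".toList with hstart
  have h0 : 0 ≤ start := by
    rw [hstart]; split
    · norm_num
    · have h1 := PySem.Chars.neg_one_le_find s.toList "<h1".toList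
      omega
  have hkk : start = ((start.toNat : Nat) : Int) := (Int.toNat_of_nonneg h0).symm
  have hk : start.toNat ≤ s.toList.length := by
    have h2 := PySem.Chars.find_le_length s.toList "<h1".toList
    rw [hstart]; split <;> omega
  rw [pvFold_eq (fun m => PySem.Chars.findFrom s.toList m.toList start) []]
  rw [hkk, List.nil_append]
  simp only [Int.toNat_natCast]
  rw [pvEnd_eq s.toList start.toNat hk]

-- ===== VERDICT (by name: the statement is the Claim_ definition above) =====
theorem extract_overview_session_index_html_spec : Claim_equal_extract_overview_session_index_html := by
  intro s _
  unfold Spec_extract_overview_session_index_html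
  exact pv_main s
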